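-- pv_equiv track=rewrite | github.com/lookoupai/AITradingSimulator | utils/pc28.py | is_pc28_straight
-- ===== SOURCE A (Python) =====
-- from typing import Iterable, Optional
--
-- def is_pc28_straight(triplet: Optional[tuple[int, int, int]]) -> bool:
--     """判断是否顺子，支持 890 / 901 / 012 这类循环顺子"""
--     if not triplet or len(set(triplet)) != 3:
--         return False
--
--     values = set(triplet)
--     for start in range(10):
--         sequence = {
--             start % 10,
--             (start + 1) % 10,
--             (start + 2) % 10
--         }
--         if values == sequence:
--             return True
--     return False
-- ===== SOURCE B (Python) =====
-- from typing import Optional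
--
-- def is_pc28_straight(triplet: Optional[tuple[int, int, int]]) -> bool:
--     """Sorted-gap classification: three distinct digits form a straight iff
--     they are consecutive when sorted, or are one of the two wrap-around
--     windows {8,9,0} and {9,0,1}."""
--     if not triplet or len(set(triplet)) != 3:
--         return False
--     a, b, c = sorted(set(triplet))
--     if a < 0 or c > 9:
--         return False
--     return (b - a == 1 and c - b == 1) or (a, b, c) == (0, 8, 9) or (a, b, c) == (0, 1, 9)
-- ===== Notes on version B (the rewrite author's own statement) =====
-- stated objective: simpler
-- what changed: Replaces A's scan over all ten cyclic windows (building a mod-10 set per window and comparing sets) by a direct classification of the sorted distinct values: both consecutive gaps equal to one, or one of the two explicit wrap-around triples, with an explicit digit-range guard.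
import Mathlib
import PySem

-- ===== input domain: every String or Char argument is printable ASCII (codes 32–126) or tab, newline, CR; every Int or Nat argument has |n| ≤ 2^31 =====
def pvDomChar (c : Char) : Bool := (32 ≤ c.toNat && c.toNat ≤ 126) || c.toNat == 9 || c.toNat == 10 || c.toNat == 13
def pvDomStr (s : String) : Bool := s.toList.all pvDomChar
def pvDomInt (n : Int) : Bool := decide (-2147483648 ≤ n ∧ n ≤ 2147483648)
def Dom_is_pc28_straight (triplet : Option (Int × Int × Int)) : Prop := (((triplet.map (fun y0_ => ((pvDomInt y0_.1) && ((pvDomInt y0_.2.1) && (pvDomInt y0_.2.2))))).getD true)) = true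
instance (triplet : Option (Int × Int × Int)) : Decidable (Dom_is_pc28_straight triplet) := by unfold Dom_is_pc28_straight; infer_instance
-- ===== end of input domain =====

-- B replaces A's 10-window cyclic scan with a direct sorted-gap classification (simpler; same result).

-- ===== PORT A =====
def is_pc28_straight (triplet : Option (Int × Int × Int)) : Bool :=
  match triplet with
  | none => false   -- 'not triplet': only None (a 3-tuple is always truthy)
  | some (x, y, z) =>
    if PySem.Set.len (PySem.Set.ofList [x, y, z]) ≠ 3 then false
    else
      -- for start in range(10): if values == sequence: return True; else False
      (PySem.List.pyRange 0 10 1).any (fun start =>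
        PySem.Set.equal (PySem.Set.ofList [x, y, z])
          (PySem.Set.ofList [PySem.Int.mod start 10,
                             PySem.Int.mod (start + 1) 10,
                             PySem.Int.mod (start + 2) 10]))

-- ===== PORT B =====
def is_pc28_straight_alt (triplet : Option (Int × Int × Int)) : Bool :=
  match triplet with
  | none => false
  | some (x, y, z) =>
    if PySem.Set.len (PySem.Set.ofList [x, y, z]) ≠ 3 then false
    else
      match PySem.List.sorted (PySem.Set.ofList [x, y, z]) (fun v => v) false with
      | [a, b, c] =>
        if a < 0 ∨ 9 < c then false
        else (decide (b - a = 1) && decide (c - b = 1))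
             || decide ((a, b, c) = (0, 8, 9)) || decide ((a, b, c) = (0, 1, 9))
      | _ => false   -- unreachable: the set has exactly 3 elements

-- ===== PRECONDITION & SPEC =====
def Spec_is_pc28_straight (triplet : Option (Int × Int × Int)) (out : Bool) : Prop := out = is_pc28_straight_alt triplet
instance (triplet : Option (Int × Int × Int)) (out : Bool) : Decidable (Spec_is_pc28_straight triplet out) := by unfold Spec_is_pc28_straight; infer_instance

-- ===== CLAIM (what is proved, stated in full; the proofs are below) =====
def Claim_equal_is_pc28_straight : Prop := ∀ (triplet : Option (Int × Int × Int)), Dom_is_pc28_straight triplet → Spec_is_pc28_straight triplet (is_pc28_straight triplet)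

-- ===== LEMMAS AND PROOFS =====

-- Every residue start % 10 lies in 0..9.
lemma pv_mod10_bounds (a : Int) : 0 ≤ PySem.Int.mod a 10 ∧ PySem.Int.mod a 10 ≤ 9 := by
  rw [PySem.Int.mod_eq_emod_of_pos (by norm_num)]
  have h1 := Int.emod_nonneg a (show (10:Int) ≠ 0 by norm_num)
  have h2 := Int.emod_lt_of_pos a (show (0:Int) < 10 by norm_num)
  omega

-- If some value of the triplet is outside 0..9, no window set (all inside 0..9) equals it.
lemma pv_equal_false_of_out (x y z v : Int) (hv : v = x ∨ v = y ∨ v = z) (ho : v < 0 ∨ 9 < v)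
    (t : List Int) (ht : ∀ u ∈ t, 0 ≤ u ∧ u ≤ 9) :
    PySem.Set.equal (PySem.Set.ofList [x, y, z]) t = false := by
  by_contra h
  rw [Bool.not_eq_false] at h
  have hm := (PySem.Set.equal_iff _ _).mp h
  have hvmem : v ∈ PySem.Set.ofList [x, y, z] := by
    rw [PySem.Set.mem_ofList]
    rcases hv with h' | h' | h' <;> simp [h']
  have := ht v ((hm v).mp hvmem)
  omega

lemma pv_A_out (x y z v : Int) (hv : v = x ∨ v = y ∨ v = z) (ho : v < 0 ∨ 9 < v) :
    is_pc28_straight (some (x, y, z)) = false := by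
  simp only [is_pc28_straight]
  by_cases hlen : PySem.Set.len (PySem.Set.ofList [x, y, z]) ≠ 3
  · rw [if_pos hlen]
  · rw [if_neg hlen]
    rw [List.any_eq_false]
    intro start _
    have hf := pv_equal_false_of_out x y z v hv ho
      [PySem.Int.mod start 10, PySem.Int.mod (start + 1) 10, PySem.Int.mod (start + 2) 10]
      (by intro u hu
          simp only [List.mem_cons, List.not_mem_nil, or_false] at hu
          rcases hu with h' | h' | h' <;> (subst h'; exact pv_mod10_bounds _))
    -- the window list has no duplicates or not; ofList of it has the same members, so reuse hf via equal_iff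
    by_contra hcon
    have hm := (PySem.Set.equal_iff _ _).mp hcon
    have : PySem.Set.equal (PySem.Set.ofList [x, y, z])
        [PySem.Int.mod start 10, PySem.Int.mod (start + 1) 10, PySem.Int.mod (start + 2) 10] = true := by
      rw [PySem.Set.equal_iff]
      intro u
      rw [hm u, PySem.Set.mem_ofList]
    rw [hf] at this
    exact Bool.false_ne_true this

lemma pv_B_out (x y z v : Int) (hv : v = x ∨ v = y ∨ v = z) (ho : v < 0 ∨ 9 < v) :
    is_pc28_straight_alt (some (x, y, z)) = false := by
  simp only [is_pc28_straight_alt]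
  by_cases hlen : PySem.Set.len (PySem.Set.ofList [x, y, z]) ≠ 3
  · rw [if_pos hlen]
  · rw [if_neg hlen]
    rw [not_not] at hlen
    have hlen3 : (PySem.List.sorted (PySem.Set.ofList [x, y, z]) (fun v => v) false).length = 3 := by
      rw [(PySem.List.sorted_perm _ _ _).length_eq]
      simp only [PySem.Set.len] at hlen
      exact_mod_cast hlen
    obtain ⟨a, b, c, habc⟩ := List.length_eq_three.mp hlen3
    have hvmem : v ∈ [a, b, c] := by
      rw [← habc, PySem.List.mem_sorted, PySem.Set.mem_ofList]
      rcases hv with h' | h' | h' <;> simp [h']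
    have hpair := PySem.List.sorted_pairwise (PySem.Set.ofList [x, y, z]) (fun v => v)
    rw [habc] at hpair
    simp only [List.pairwise_cons, List.mem_cons, List.not_mem_nil, or_false] at hpair
    have hab : a ≤ b := hpair.1 b (Or.inl rfl)
    have hac : a ≤ c := hpair.1 c (Or.inr rfl)
    have hbc : b ≤ c := hpair.2.1 c rfl
    simp only [List.mem_cons, List.not_mem_nil, or_false] at hvmem
    have hcond : a < 0 ∨ 9 < c := by rcases hvmem with h' | h' | h' <;> (subst h'; omega)
    rw [habc]
    simp [hcond]

-- The in-range cube 0..9 × 0..9 × 0..9 is finite: check it exhaustively.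
lemma pv_bounded : ∀ x ∈ Finset.Icc (0:Int) 9, ∀ y ∈ Finset.Icc (0:Int) 9, ∀ z ∈ Finset.Icc (0:Int) 9,
    is_pc28_straight (some (x, y, z)) = is_pc28_straight_alt (some (x, y, z)) := by decide

lemma pv_main (x y z : Int) :
    is_pc28_straight (some (x, y, z)) = is_pc28_straight_alt (some (x, y, z)) := by
  by_cases h : (0 ≤ x ∧ x ≤ 9) ∧ (0 ≤ y ∧ y ≤ 9) ∧ (0 ≤ z ∧ z ≤ 9)
  · exact pv_bounded x (Finset.mem_Icc.mpr h.1) y (Finset.mem_Icc.mpr h.2.1) z (Finset.mem_Icc.mpr h.2.2)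
  · have hout : (x < 0 ∨ 9 < x) ∨ (y < 0 ∨ 9 < y) ∨ (z < 0 ∨ 9 < z) := by omega
    rcases hout with h' | h' | h'
    · rw [pv_A_out x y z x (Or.inl rfl) h', pv_B_out x y z x (Or.inl rfl) h']
    · rw [pv_A_out x y z y (Or.inr (Or.inl rfl)) h', pv_B_out x y z y (Or.inr (Or.inl rfl)) h']
    · rw [pv_A_out x y z z (Or.inr (Or.inr rfl)) h', pv_B_out x y z z (Or.inr (Or.inr rfl)) h']

-- ===== VERDICT (by name: the statement is the Claim_ definition above) =====
theorem is_pc28_straight_spec : Claim_equal_is_pc28_straight := by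
  intro triplet _
  unfold Spec_is_pc28_straight
  match triplet with
  | none => rfl
  | some (x, y, z) => exact pv_main x y z
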